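-- pv_equiv track=rewrite | github.com/JHGFD82/CJK_Translate_GPT | tests/test_parallel_translation.py | _make_triples
-- ===== SOURCE A (Python) =====
-- def _make_triples(n: int):
--     """Return n (index, page_text, previous_page) triples with distinct content."""
--     triples = []
--     prev = ""
--     for i in range(n):
--         page = f"Page {i} content"
--         triples.append((i, page, prev))
--         prev = page
--     return triples
-- ===== SOURCE B (Python) =====
-- def _make_triples(n: int):
--     """Return n (index, page_text, previous_page) triples with distinct content."""
--     pages = [f"Page {i} content" for i in range(n)]
--     prevs = [""] + pages[:-1]
--     return list(zip(range(n), pages, prevs))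
-- ===== Notes on version B (the rewrite author's own statement) =====
-- stated objective: alternative
-- what changed: A threads a running 'prev' accumulator through a single loop appending triples; B precomputes the list of page strings once and pairs it with its shifted predecessor list ([""] + pages[:-1]) via zip, removing the loop-carried state.
import Mathlib
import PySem

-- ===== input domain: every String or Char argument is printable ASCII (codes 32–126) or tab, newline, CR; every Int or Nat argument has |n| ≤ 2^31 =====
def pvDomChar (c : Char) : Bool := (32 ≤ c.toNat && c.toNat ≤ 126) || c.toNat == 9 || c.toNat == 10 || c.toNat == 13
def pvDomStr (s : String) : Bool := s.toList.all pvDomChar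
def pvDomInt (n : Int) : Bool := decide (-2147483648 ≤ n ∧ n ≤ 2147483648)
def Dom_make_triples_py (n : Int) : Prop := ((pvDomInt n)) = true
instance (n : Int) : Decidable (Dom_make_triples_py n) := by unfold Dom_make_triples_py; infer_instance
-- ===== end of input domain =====

-- B replaces A's loop with a running 'prev' accumulator by a precompute-then-zip-with-shift
-- decomposition (same cost, different structure); return values are proved equal for every n.

-- ===== PORT A =====
def make_triples_py (n : Int) : List (Int × String × String) :=
  ((PySem.List.pyRange 0 n 1).foldl
    (fun (st : List (Int × String × String) × String) i =>
      let page := "Page " ++ PySem.Int.toStr i ++ " content"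
      (st.1 ++ [(i, page, st.2)], page))
    ([], "")).1

-- ===== PORT B =====
def make_triples_py_alt (n : Int) : List (Int × String × String) :=
  let pages := (PySem.List.pyRange 0 n 1).map
    (fun i => "Page " ++ PySem.Int.toStr i ++ " content")
  -- pages[:-1] is exactly List.dropLast (all elements but the last, [] on [])
  let prevs := [""] ++ pages.dropLast
  (PySem.List.pyRange 0 n 1).zip (pages.zip prevs)

-- ===== PRECONDITION & SPEC =====
def Spec_make_triples_py (n : Int) (out : List (Int × String × String)) : Prop := out = make_triples_py_alt n
instance (n : Int) (out : List (Int × String × String)) : Decidable (Spec_make_triples_py n out) := by unfold Spec_make_triples_py; infer_instance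

-- ===== CLAIM (what is proved, stated in full; the proofs are below) =====
def Claim_equal_make_triples_py : Prop := ∀ (n : Int), Dom_make_triples_py n → Spec_make_triples_py n (make_triples_py n)

-- ===== LEMMAS AND PROOFS =====
def pvPg (i : Int) : String := "Page " ++ PySem.Int.toStr i ++ " content"

def pvSpecList (m : Nat) : List (Int × String × String) :=
  (List.range m).map (fun k : Nat =>
    ((k : Int), pvPg (k : Int), if k = 0 then "" else pvPg ((k : Int) - 1)))

theorem pvA_fold (m : Nat) :
    (PySem.List.pyRange 0 (m : Int) 1).foldl
      (fun (st : List (Int × String × String) × String) i =>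
        (st.1 ++ [(i, "Page " ++ PySem.Int.toStr i ++ " content", st.2)],
         "Page " ++ PySem.Int.toStr i ++ " content"))
      ([], "")
    = (pvSpecList m, if m = 0 then "" else pvPg ((m : Int) - 1)) := by
  induction m with
  | zero => simp [PySem.List.pyRange_one_eq_nil, pvSpecList]
  | succ m ih =>
    have h : PySem.List.pyRange 0 ((m + 1 : Nat) : Int) 1
        = PySem.List.pyRange 0 (m : Int) 1 ++ [(m : Int)] := by
      push_cast
      exact PySem.List.pyRange_one_succ_right (by positivity)
    rw [h, List.foldl_append, ih]
    simp only [List.foldl_cons, List.foldl_nil, Prod.mk.injEq]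
    refine ⟨?_, ?_⟩
    · simp [pvSpecList, List.range_succ, pvPg]
    · simp only [Nat.succ_ne_zero, if_false, pvPg]
      have : ((m + 1 : Nat) : Int) - 1 = (m : Int) := by push_cast; ring
      rw [this]

theorem pvB_eq (m : Nat) : make_triples_py_alt (m : Int) = pvSpecList m := by
  unfold make_triples_py_alt pvSpecList
  rw [PySem.List.pyRange_zero_nat]
  apply List.ext_getElem
  · simp only [List.length_zip, List.length_map, List.length_range, List.length_append,
      List.length_dropLast, List.length_cons, List.length_nil]
    omega
  · intro k hk1 hk2
    simp only [List.length_map, List.length_range] at hk2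
    simp only [List.getElem_zip, List.getElem_map, List.getElem_range, pvPg]
    cases k with
    | zero =>
      simp
    | succ k =>
      have hk : k + 1 < m := hk2
      rw [List.getElem_append_right (by simp)]
      simp only [List.length_cons, List.length_nil, Nat.add_sub_cancel, List.getElem_dropLast,
        List.getElem_map, List.getElem_range]
      have h0 : (k + 1 : Nat) ≠ 0 := Nat.succ_ne_zero k
      rw [if_neg h0]
      have : ((k + 1 : Nat) : Int) - 1 = (k : Int) := by push_cast; ring
      rw [this]

-- ===== VERDICT (by name: the statement is the Claim_ definition above) =====
theorem make_triples_py_spec : Claim_equal_make_triples_py := by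
  intro n _
  unfold Spec_make_triples_py
  by_cases hn : n ≤ 0
  · simp [make_triples_py, make_triples_py_alt, PySem.List.pyRange_one_eq_nil hn]
  · have hn' : n = (n.toNat : Int) := by omega
    rw [hn']
    have := pvA_fold n.toNat
    simp only [make_triples_py, this, pvB_eq]
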